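-- pv_equiv track=rewrite | github.com/HaileyKataram/Sleep-Apnea-Detection | enhanced_app.py | _find_continuous_regions
-- ===== SOURCE A (Python) =====
-- def _find_continuous_regions(mask):
--     """Find continuous True regions in boolean mask."""
--     regions = []
--     in_region = False
--     start_idx = 0
--
--     for i, value in enumerate(mask):
--         if value and not in_region:
--             start_idx = i
--             in_region = True
--         elif not value and in_region:
--             regions.append((start_idx, i))
--             in_region = False
--
--     if in_region:
--         regions.append((start_idx, len(mask)))
--
--     return regions
-- ===== SOURCE B (Python) =====
-- from itertools import groupby
--
--
-- def _find_continuous_regions(mask):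
--     """Find continuous True regions by chunking the mask into runs."""
--     regions = []
--     idx = 0
--     for value, group in groupby(mask, key=bool):
--         n = sum(1 for _ in group)
--         if value:
--             regions.append((idx, idx + n))
--         idx += n
--     return regions
-- ===== Notes on version B (the rewrite author's own statement) =====
-- stated objective: idiomatic
-- what changed: Replaced the rising/falling-edge state machine (in_region flag, start_idx, tail flush) by itertools.groupby run-chunking: each maximal run is consumed at once and a region (idx, idx+len) is emitted per True run.
import Mathlib
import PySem

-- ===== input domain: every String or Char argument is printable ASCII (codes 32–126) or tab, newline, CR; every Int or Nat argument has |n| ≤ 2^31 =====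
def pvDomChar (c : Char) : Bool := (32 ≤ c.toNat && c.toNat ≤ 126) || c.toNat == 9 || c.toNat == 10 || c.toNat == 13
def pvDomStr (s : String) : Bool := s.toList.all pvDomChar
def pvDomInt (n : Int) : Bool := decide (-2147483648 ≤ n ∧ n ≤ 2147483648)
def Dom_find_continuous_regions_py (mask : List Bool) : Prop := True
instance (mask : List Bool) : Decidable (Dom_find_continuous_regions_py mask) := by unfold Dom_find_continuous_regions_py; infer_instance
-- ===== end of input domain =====

-- ===== PORT A =====
-- B changes: groupby run-chunking instead of the edge-triggered state machine (objective: idiomatic).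
-- Loop of A as structural recursion over the same state (i, in_region, start_idx, regions);
-- the tail flush `regions.append((start_idx, len(mask)))` happens at the base case, where the
-- running index i equals len(mask).
def aRun (mask : List Bool) (i : Int) (inr : Bool) (start : Int) (acc : List (Int × Int)) :
    List (Int × Int) :=
  match mask with
  | [] => if inr then acc ++ [(start, i)] else acc
  | v :: rest =>
    if v && !inr then aRun rest (i + 1) true i acc
    else if !v && inr then aRun rest (i + 1) false start (acc ++ [(start, i)])
    else aRun rest (i + 1) inr start acc

def find_continuous_regions_py (mask : List Bool) : List (Int × Int) :=
  aRun mask 0 false 0 []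

-- ===== PORT B =====
-- each step consumes one whole run (a groupby group); n = run length, idx advances by n
def bChunks (mask : List Bool) (idx : Int) : List (Int × Int) :=
  match mask with
  | [] => []
  | v :: rest =>
    let n : Int := 1 + (rest.takeWhile (fun x => x == v)).length
    let rest' := rest.dropWhile (fun x => x == v)
    if v then (idx, idx + n) :: bChunks rest' (idx + n) else bChunks rest' (idx + n)
termination_by mask.length
decreasing_by
  all_goals exact Nat.lt_succ_of_le (List.length_dropWhile_le _ _)

def find_continuous_regions_py_alt (mask : List Bool) : List (Int × Int) :=
  bChunks mask 0

-- ===== PRECONDITION & SPEC =====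
def Spec_find_continuous_regions_py (mask : List Bool) (out : List (Int × Int)) : Prop := out = find_continuous_regions_py_alt mask
instance (mask : List Bool) (out : List (Int × Int)) : Decidable (Spec_find_continuous_regions_py mask out) := by unfold Spec_find_continuous_regions_py; infer_instance

-- ===== CLAIM (what is proved, stated in full; the proofs are below) =====
def Claim_equal_find_continuous_regions_py : Prop := ∀ (mask : List Bool), Dom_find_continuous_regions_py mask → Spec_find_continuous_regions_py mask (find_continuous_regions_py mask)

-- ===== LEMMAS AND PROOFS =====

-- skipping one leading False is the same as letting bChunks swallow the whole False run
theorem bChunks_skip_false (rest : List Bool) (i : Int) :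
    bChunks (false :: rest) i = bChunks rest (i + 1) := by
  cases rest with
  | nil => simp [bChunks]
  | cons v rest2 =>
    cases v with
    | true => simp [bChunks]
    | false =>
      rw [bChunks, bChunks]
      simp only [List.takeWhile, List.dropWhile, beq_self_eq_true, List.length_cons,
        if_neg (by simp : ¬ (false = true))]
      push_cast
      ring_nf

-- joint loop invariant for both machine states (in_region = false / true)
theorem aRun_eq (mask : List Bool) :
    (∀ (i s : Int) (acc : List (Int × Int)),
        aRun mask i false s acc = acc ++ bChunks mask i) ∧
    (∀ (i s : Int) (acc : List (Int × Int)),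
        aRun mask i true s acc =
          acc ++ (s, i + ((mask.takeWhile (fun x => x == true)).length : Int)) ::
            bChunks (mask.dropWhile (fun x => x == true)) (i + ((mask.takeWhile (fun x => x == true)).length : Int))) := by
  induction mask with
  | nil => simp [aRun, bChunks]
  | cons v rest ih =>
    obtain ⟨ih1, ih2⟩ := ih
    constructor
    · intro i s acc
      cases v with
      | false =>
        rw [aRun]; norm_num
        rw [ih1, bChunks_skip_false]
      | true =>
        rw [aRun]; norm_num
        rw [ih2, bChunks]; norm_num
        refine ⟨by ring, ?_⟩
        congr 1
        ring
    · intro i s acc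
      cases v with
      | false =>
        rw [aRun]; norm_num
        rw [ih1]
        simp [bChunks_skip_false]
      | true =>
        rw [aRun]; norm_num
        rw [ih2]
        simp
        refine ⟨by ring, ?_⟩
        congr 1
        ring

-- ===== VERDICT (by name: the statement is the Claim_ definition above) =====
theorem find_continuous_regions_py_spec : Claim_equal_find_continuous_regions_py := by
  intro mask _
  unfold Spec_find_continuous_regions_py find_continuous_regions_py find_continuous_regions_py_alt
  simpa using (aRun_eq mask).1 0 0 []
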